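-- pv_equiv track=rewrite | github.com/tuergeist/HackerRank | challenges/30_review_loop.py | getEvenOddSubs
-- ===== SOURCE A (Python) =====
-- def getEvenOddSubs(s):
--     even = odd = ""
--     l = 0
--     for x in s:
--         if l == 0:
--             even += x
--             l = 1
--         else:
--             odd += x
--             l = 0
--     return even, odd
-- ===== SOURCE B (Python) =====
-- def getEvenOddSubs(s):
--     return s[::2], s[1::2]
-- ===== Notes on version B (the rewrite author's own statement) =====
-- stated objective: idiomatic
-- what changed: replaces the toggling-flag loop with string concatenation by two extended slices s[::2] and s[1::2]; the measured speedup comes from slicing in one C-level operation instead of a per-character Python loop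
import Mathlib
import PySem

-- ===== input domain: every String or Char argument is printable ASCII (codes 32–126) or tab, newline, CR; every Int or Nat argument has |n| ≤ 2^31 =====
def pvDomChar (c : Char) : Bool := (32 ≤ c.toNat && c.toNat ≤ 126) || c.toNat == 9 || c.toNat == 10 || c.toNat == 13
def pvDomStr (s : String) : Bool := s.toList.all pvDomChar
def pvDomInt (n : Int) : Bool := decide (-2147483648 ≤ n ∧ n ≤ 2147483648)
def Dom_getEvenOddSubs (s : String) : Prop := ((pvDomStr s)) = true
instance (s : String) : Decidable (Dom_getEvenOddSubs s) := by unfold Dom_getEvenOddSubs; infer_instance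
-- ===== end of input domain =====

-- B replaces A's toggling-flag accumulation loop with the two extended slices s[::2] and s[1::2] (idiomatic).

-- ===== PORT A =====
-- one loop step of A: append x to even or odd according to the flag l, toggling it
def stepA (st : String × String × Int) (x : Char) : String × String × Int :=
  if st.2.2 == 0 then (st.1.push x, st.2.1, 1) else (st.1, st.2.1.push x, 0)

def getEvenOddSubs (s : String) : String × String :=
  let r := s.toList.foldl stepA ("", "", (0 : Int))
  (r.1, r.2.1)

-- ===== PORT B =====
-- s[::2] and s[1::2]; step 2 is never 0, so the slices always exist
def getEvenOddSubs_alt (s : String) : String × String :=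
  ((PySem.Str.slice? s none none 2).getD "", (PySem.Str.slice? s (some 1) none 2).getD "")

-- ===== PRECONDITION & SPEC =====
def Spec_getEvenOddSubs (s : String) (out : String × String) : Prop := out = getEvenOddSubs_alt s
instance (s : String) (out : String × String) : Decidable (Spec_getEvenOddSubs s out) := by unfold Spec_getEvenOddSubs; infer_instance

-- ===== CLAIM (what is proved, stated in full; the proofs are below) =====
def Claim_equal_getEvenOddSubs : Prop := ∀ (s : String), Dom_getEvenOddSubs s → Spec_getEvenOddSubs s (getEvenOddSubs s)

-- ===== LEMMAS AND PROOFS =====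

-- the even-indexed elements of a list
def evens {α : Type} : List α → List α
  | [] => []
  | [x] => [x]
  | x :: _ :: xs => x :: evens xs

lemma evens_cons {α : Type} (x : α) (xs : List α) :
    evens (x :: xs) = x :: evens xs.tail := by
  cases xs <;> rfl

-- the even-index selector that slice? with step 2 computes
def evSel {α : Type} (l : List α) : List α :=
  (List.range ((l.length + 1) / 2)).filterMap (fun k : Nat => l[((2 : Int) * (k : Int)).toNat]?)

lemma evSel_eq_evens {α : Type} : ∀ l : List α, evSel l = evens l
  | [] => by simp [evSel, evens]
  | [x] => by simp [evSel, evens]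
  | x :: y :: xs => by
    have hr : ((x :: y :: xs).length + 1) / 2 = (xs.length + 1) / 2 + 1 := by
      simp only [List.length_cons]
      omega
    rw [show evens (x :: y :: xs) = x :: evens xs from rfl, ← evSel_eq_evens xs]
    simp only [evSel, hr, List.range_succ_eq_map]
    simp only [List.filterMap_cons, Nat.cast_zero, mul_zero, Int.toNat_zero,
      List.getElem?_cons_zero, List.filterMap_map]
    refine congrArg (x :: ·) ?_
    refine List.filterMap_congr ?_
    intro k _
    have h2 : (2 * ((k : Int) + 1)).toNat = (2 * (k : Int)).toNat + 2 := by omega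
    simp [Function.comp, h2]

lemma slice?_step2_even {α : Type} (l : List α) :
    PySem.List.slice? l none none 2 = some (evens l) := by
  rw [← evSel_eq_evens]
  simp only [PySem.List.slice?, PySem.List.sliceIndices]
  norm_num
  rcases l with _ | ⟨x, xs⟩
  · simp [evSel]
  · rw [if_pos (by simp : 0 < (x :: xs).length)]
    have hc : ((((x :: xs).length : Int) + 2 - 1) / 2).toNat = ((x :: xs).length + 1) / 2 := by
      omega
    rw [hc]
    simp only [evSel]

lemma slice?_step2_odd {α : Type} (l : List α) :
    PySem.List.slice? l (some 1) none 2 = some (evens l.tail) := by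
  rw [← evSel_eq_evens]
  simp only [PySem.List.slice?, PySem.List.sliceIndices]
  norm_num
  rcases l with _ | ⟨x, xs⟩
  · simp [evSel]
  · have h1 : min (1 : Int) ((x :: xs).length : Int) = 1 := by
      simp only [List.length_cons]
      omega
    rw [h1]
    by_cases hx : 1 < (x :: xs).length
    · rw [if_pos hx]
      have hc : ((((x :: xs).length : Int) - 1 + 2 - 1) / 2).toNat = (xs.length + 1) / 2 := by
        simp only [List.length_cons] at hx ⊢
        omega
      rw [hc]
      simp only [evSel, List.tail_cons]
      refine List.filterMap_congr ?_
      intro k _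
      have h2 : (1 + 2 * (k : Int)).toNat = (2 * (k : Int)).toNat + 1 := by omega
      simp [h2]
    · rw [if_neg hx]
      have hx0 : xs = [] := by
        simp only [List.length_cons] at hx
        exact List.eq_nil_of_length_eq_zero (by omega)
      
      subst hx0
      simp [evSel]

-- the fold of A, tracked for both flag values at once
lemma foldA_spec : ∀ (l : List Char) (ev od : String),
    (l.foldl stepA (ev, od, (0 : Int))).1.toList = ev.toList ++ evens l ∧
    (l.foldl stepA (ev, od, (0 : Int))).2.1.toList = od.toList ++ evens l.tail ∧
    (l.foldl stepA (ev, od, (1 : Int))).1.toList = ev.toList ++ evens l.tail ∧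
    (l.foldl stepA (ev, od, (1 : Int))).2.1.toList = od.toList ++ evens l
  | [], ev, od => by simp [evens]
  | x :: xs, ev, od => by
    have ih0 := foldA_spec xs (ev.push x) od
    have ih1 := foldA_spec xs ev (od.push x)
    refine ⟨?_, ?_, ?_, ?_⟩ <;>
      simp only [List.foldl_cons, stepA, evens_cons, List.tail_cons] <;>
      norm_num <;>
      simp [ih0.2.2.1, ih0.2.2.2, ih1.1, ih1.2.1, String.toList_push]

-- ===== VERDICT (by name: the statement is the Claim_ definition above) =====
theorem getEvenOddSubs_spec : Claim_equal_getEvenOddSubs := by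
  intro s _
  unfold Spec_getEvenOddSubs getEvenOddSubs getEvenOddSubs_alt
  have h := foldA_spec s.toList "" ""
  have he : PySem.Str.slice? s none none 2 = some (String.ofList (evens s.toList)) := by
    simp [PySem.Str.slice?, PySem.Chars.slice?_eq_listSlice?, slice?_step2_even]
  have ho : PySem.Str.slice? s (some 1) none 2 = some (String.ofList (evens s.toList.tail)) := by
    simp [PySem.Str.slice?, PySem.Chars.slice?_eq_listSlice?, slice?_step2_odd]
  rw [he, ho]
  simp only [Option.getD_some]
  refine Prod.ext ?_ ?_
  · rw [← String.toList_inj]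
    simpa [String.toList_ofList] using h.1
  · rw [← String.toList_inj]
    simpa [String.toList_ofList] using h.2.1
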